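-- pv_equiv track=rewrite | github.com/IGOREK3000/FASTQ_Lab | fast4_trim.py | sliding_window_trim
-- ===== SOURCE A (Python) =====
-- def get_qualities_with_zero_ns(seq, qual):
--     q = []
--     for el, q_char in zip(seq, qual):
--         if el == "N":
--             q.append(0)
--         else:
--             q.append(ord(q_char) - 33)
--     return q
--
-- def sliding_window_trim(seq, qual, window_length=5, required_quality=30):
--     quals = get_qualities_with_zero_ns(seq, qual)
--     total_required_quality = required_quality * window_length
--
--     # если read короче окна, то удаляется
--     if len(quals) < window_length:
--         return None
--     # первое окно
--     total = sum(quals[:window_length])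
--     if total < total_required_quality:
--         return None
--     #сколько первых символов последовательности мы пока планируем оставит (изначально весь read)
--     length_to_keep = len(quals)
--     # скользящее окно
--     for i in range(len(quals) - window_length):
--          # убираем левый символ и добавляем новый справа
--         total = total - quals[i] + quals[i + window_length]
--
--         if total < total_required_quality:
--             # на веремя ставим границу в правый край этого окна
--             length_to_keep = i + window_length
--             break
--
--     # идни влево, пока последний сохраняемый символ не подходит
--     i = length_to_keep
--     last_base_quality = quals[i - 1]
--
--     while last_base_quality < required_quality and i > 1:
--         i -= 1
--         last_base_quality = quals[i - 1]
--
--     if i < 1: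
--         return None
--     # если read стал короче (до i)
--     if i < len(quals):
--         return seq[:i], qual[:i]
--
--     return seq, qual
-- ===== SOURCE B (Python) =====
-- def sliding_window_trim(seq, qual, window_length=5, required_quality=30):
--     n = min(len(seq), len(qual))
--     quals = [0 if seq[k] == "N" else ord(qual[k]) - 33 for k in range(n)]
--     if n < window_length:
--         return None
--     pre = [0]
--     s = 0
--     for v in quals:
--         s += v
--         pre.append(s)
--     need = required_quality * window_length
--     if pre[window_length] < need:
--         return None
--     keep = next((j - 1 + window_length
--                  for j in range(1, n - window_length + 1)
--                  if pre[j + window_length] - pre[j] < need), n)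
--     i = next((j for j in range(keep, 0, -1) if quals[j - 1] >= required_quality), 1)
--     if i < n:
--         return seq[:i], qual[:i]
--     return seq, qual
-- ===== Notes on version B (the rewrite author's own statement) =====
-- stated objective: alternative
-- what changed: B replaces A's rolling-sum window loop with a prefix-sum array (window sum = pre[j+w]-pre[j]), builds qualities by direct indexing instead of a zip-append helper, and replaces the decrementing while-walk with a first-match search over a descending range; the unreachable i<1 branch is dropped.
-- outside the precondition, e.g. on sliding_window_trim('ABCD', 'IIII', -2, -45): A returns None, B returns ('A', 'I')
import Mathlib
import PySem

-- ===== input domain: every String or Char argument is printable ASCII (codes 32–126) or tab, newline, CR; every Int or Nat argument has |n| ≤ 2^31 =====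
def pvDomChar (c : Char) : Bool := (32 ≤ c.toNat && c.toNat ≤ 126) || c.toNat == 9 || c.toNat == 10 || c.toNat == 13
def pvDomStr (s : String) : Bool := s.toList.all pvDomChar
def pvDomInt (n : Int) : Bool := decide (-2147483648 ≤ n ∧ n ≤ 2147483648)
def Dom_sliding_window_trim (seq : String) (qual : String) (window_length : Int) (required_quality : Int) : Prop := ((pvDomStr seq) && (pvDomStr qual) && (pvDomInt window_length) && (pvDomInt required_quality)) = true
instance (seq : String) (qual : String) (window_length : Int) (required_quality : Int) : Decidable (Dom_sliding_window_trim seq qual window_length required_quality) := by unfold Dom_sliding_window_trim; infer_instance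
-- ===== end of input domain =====

-- B replaces A's rolling-sum window loop by a prefix-sum array and A's decrementing while-walk by a
-- first-match search over a descending range (objective: alternative, same asymptotic cost).

-- ===== PORT A =====
-- helper get_qualities_with_zero_ns: loop over zip(seq, qual) appending 0 for 'N' else ord-33
def pvQuals (s q : List Char) : List Int :=
  (s.zip q).map (fun p => if p.1 = 'N' then (0 : Int) else (p.2.toNat : Int) - 33)

-- A's sliding-window for-loop with break: state = (total, length_to_keep); indices in range under Pre_
def pvALoop (q : List Int) (w req : Int) : List Int → Int → Int → Int
  | [], _, keep => keep
  | i :: rest, total, keep =>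
    let t := total - PySem.List.pyGetD q i 0 + PySem.List.pyGetD q (i + w) 0
    if t < req then i + w else pvALoop q w req rest t keep

-- A's leftward while-loop: while quals[i-1] < rq and i > 1: i -= 1
def pvAWalk (q : List Int) (rq i : Int) : Int :=
  if h : PySem.List.pyGetD q (i - 1) 0 < rq ∧ 1 < i then pvAWalk q rq (i - 1) else i
termination_by i.toNat
decreasing_by omega

def sliding_window_trim (seq : String) (qual : String) (window_length : Int) (required_quality : Int) : Option (String × String) :=
  let quals := pvQuals seq.toList qual.toList
  let req := required_quality * window_length
  if (quals.length : Int) < window_length then none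
  else if (PySem.List.slice quals none (some window_length)).sum < req then none
  else
    let keep := pvALoop quals window_length req
      (PySem.List.pyRange 0 ((quals.length : Int) - window_length) 1)
      ((PySem.List.slice quals none (some window_length)).sum) ((quals.length : Int))
    let i := pvAWalk quals required_quality keep
    if i < 1 then none
    else if i < (quals.length : Int) then
      some (PySem.Str.slice seq none (some i), PySem.Str.slice qual none (some i))
    else some (seq, qual)

-- ===== PORT B =====
-- prefix sums: s = 0; pre = [0]; for v in quals: s += v; pre.append(s)
def pvPrefix (s : Int) : List Int → List Int
  | [] => [s]
  | v :: rest => s :: pvPrefix (s + v) rest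

-- next((j - 1 + w for j in range(1, n-w+1) if pre[j+w] - pre[j] < need), n)
def pvFindKeep (pre : List Int) (w need : Int) : List Int → Option Int
  | [] => none
  | j :: rest =>
    if PySem.List.pyGetD pre (j + w) 0 - PySem.List.pyGetD pre j 0 < need then some (j - 1 + w)
    else pvFindKeep pre w need rest

-- next((j for j in range(keep, 0, -1) if quals[j-1] >= rq), 1)
def pvFindCut (q : List Int) (rq : Int) : List Int → Option Int
  | [] => none
  | j :: rest => if rq ≤ PySem.List.pyGetD q (j - 1) 0 then some j else pvFindCut q rq rest

def sliding_window_trim_alt (seq : String) (qual : String) (window_length : Int) (required_quality : Int) : Option (String × String) :=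
  let n := min (PySem.Str.len seq) (PySem.Str.len qual)
  let quals := (PySem.List.pyRange 0 n 1).map (fun k =>
    if PySem.List.pyGetD seq.toList k ' ' = 'N' then (0 : Int)
    else ((PySem.List.pyGetD qual.toList k ' ').toNat : Int) - 33)
  if n < window_length then none
  else
    let pre := pvPrefix 0 quals
    let need := required_quality * window_length
    if PySem.List.pyGetD pre window_length 0 < need then none
    else
      let keep := (pvFindKeep pre window_length need
        (PySem.List.pyRange 1 (n - window_length + 1) 1)).getD n
      let i := (pvFindCut quals required_quality (PySem.List.pyRange keep 0 (-1))).getD 1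
      if i < n then
        some (PySem.Str.slice seq none (some i), PySem.Str.slice qual none (some i))
      else some (seq, qual)

-- ===== PRECONDITION & SPEC =====
-- Pre_ excludes window_length < 1, where A's empty/negative window slice and Python's
-- negative-index wraparound make A raise IndexError on most inputs and return accidental
-- values on the rest; B's prefix-sum scan behaves differently there (see cites).
def Pre_sliding_window_trim (seq : String) (qual : String) (window_length : Int) (required_quality : Int) : Prop :=
  1 ≤ window_length
instance (seq : String) (qual : String) (window_length : Int) (required_quality : Int) : Decidable (Pre_sliding_window_trim seq qual window_length required_quality) := by unfold Pre_sliding_window_trim; infer_instance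

def pvWitness_sliding_window_trim : String × String × Int × Int := ("ACGT", "IIII", 2, 30)

def Spec_sliding_window_trim (seq : String) (qual : String) (window_length : Int) (required_quality : Int) (out : Option (String × String)) : Prop := out = sliding_window_trim_alt seq qual window_length required_quality
instance (seq : String) (qual : String) (window_length : Int) (required_quality : Int) (out : Option (String × String)) : Decidable (Spec_sliding_window_trim seq qual window_length required_quality out) := by unfold Spec_sliding_window_trim; infer_instance

-- ===== CLAIM (what is proved, stated in full; the proofs are below) =====
def Claim_equal_sliding_window_trim : Prop := ∀ (seq : String) (qual : String) (window_length : Int) (required_quality : Int), Dom_sliding_window_trim seq qual window_length required_quality → Pre_sliding_window_trim seq qual window_length required_quality → Spec_sliding_window_trim seq qual window_length required_quality (sliding_window_trim seq qual window_length required_quality)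

-- ===== LEMMAS AND PROOFS =====

-- the two quality lists coincide
lemma pvQuals_eq (s qu : List Char) :
    (PySem.List.pyRange 0 ((min (s.length) (qu.length) : Nat) : Int) 1).map (fun k =>
      if PySem.List.pyGetD s k ' ' = 'N' then (0 : Int)
      else ((PySem.List.pyGetD qu k ' ').toNat : Int) - 33) = pvQuals s qu := by
  rw [PySem.List.pyRange_zero_nat, List.map_map]
  apply List.ext_getElem
  · simp [pvQuals]
  · intro k h1 h2
    simp only [List.getElem_map, List.getElem_range, Function.comp_apply]
    have hk : k < min s.length qu.length := by simpa using h1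
    have hs : k < s.length := by omega
    have hq : k < qu.length := by omega
    unfold pvQuals
    rw [List.getElem_map, List.getElem_zip]
    simp [List.getD_eq_getElem?_getD, List.getElem?_eq_getElem hs, List.getElem?_eq_getElem hq]

lemma pvQuals_length (s qu : List Char) : (pvQuals s qu).length = min s.length qu.length := by
  simp [pvQuals]

-- pvPrefix indexes to partial sums
lemma pvPrefix_getD (q : List Int) : ∀ (j : Nat) (acc : Int), j ≤ q.length →
    (pvPrefix acc q).getD j 0 = acc + (q.take j).sum := by
  induction q with
  | nil => intro j acc h; simp at h; subst h; simp [pvPrefix]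
  | cons v rest ih =>
    intro j acc h
    cases j with
    | zero => simp [pvPrefix]
    | succ j' =>
      simp only [pvPrefix, List.getD_cons_succ, List.take_succ_cons, List.sum_cons]
      rw [ih j' (acc + v) (by simpa using h)]
      ring

-- window sum
def pvWsum (q : List Int) (a w : Nat) : Int := ((q.drop a).take w).sum

lemma pvWindowStep (q : List Int) (a w : Nat) (hw : 1 ≤ w) (h : a + w < q.length) :
    pvWsum q (a + 1) w = pvWsum q a w - q[a]'(by omega) + q[a + w]'(by omega) := by
  unfold pvWsum
  have hda : q.drop a = q[a]'(by omega) :: q.drop (a + 1) := List.drop_eq_getElem_cons (by omega)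
  obtain ⟨w', rfl⟩ : ∃ w', w = w' + 1 := ⟨w - 1, by omega⟩
  rw [hda, List.take_succ_cons, List.sum_cons]
  have hlen : w' < (q.drop (a + 1)).length := by simp; omega
  have h1 : (q.drop (a + 1)).take (w' + 1)
      = (q.drop (a + 1)).take w' ++ ((q.drop (a + 1))[w']?).toList := List.take_add_one
  rw [h1, List.getElem?_eq_getElem hlen, List.getElem_drop]
  simp only [Option.toList_some, List.sum_append, List.sum_cons, List.sum_nil]
  have hg : q[a + 1 + w']'(by omega) = q[a + (w' + 1)]'(by omega) := by congr 1; omega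
  rw [hg]; ring

-- rolling-sum loop = prefix-sum first-match scan
lemma pvTakeDiff (q : List Int) (a w : Nat) :
    (q.take (a + w)).sum - (q.take a).sum = pvWsum q a w := by
  rw [List.take_add, List.sum_append]
  unfold pvWsum
  ring

lemma pvLoopEq (q : List Int) (w req : Int) (hw : 1 ≤ w) :
    ∀ (m a : Nat), q.length = a + w.toNat + m →
    pvALoop q w req (PySem.List.pyRange ((a : Nat) : Int) ((q.length : Int) - w) 1)
        (pvWsum q a w.toNat) ((q.length : Int))
      = (pvFindKeep (pvPrefix 0 q) w req
          (PySem.List.pyRange (((a : Nat) : Int) + 1) ((q.length : Int) - w + 1) 1)).getD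
          ((q.length : Int)) := by
  have hw' : ((w.toNat : Nat) : Int) = w := by omega
  intro m
  induction m with
  | zero =>
    intro a hlen
    have hb : (q.length : Int) - w = (a : Int) := by push_cast [hlen]; omega
    rw [hb, PySem.List.pyRange_one_eq_nil le_rfl,
        PySem.List.pyRange_one_eq_nil (by omega : (a : Int) + 1 ≤ (a : Int) + 1)]
    rfl
  | succ m ih =>
    intro a hlen
    set w' := w.toNat with hw'def
    have ha1 : (a : Int) < (q.length : Int) - w := by push_cast [hlen]; omega
    rw [PySem.List.pyRange_one_cons ha1,
        PySem.List.pyRange_one_cons (by omega : (a : Int) + 1 < (q.length : Int) - w + 1)]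
    simp only [pvALoop, pvFindKeep]
    have hawn : a + w' < q.length := by omega
    have han : a < q.length := by omega
    -- A's updated total
    have hget1 : PySem.List.pyGetD q ((a : Nat) : Int) 0 = q[a]'han := by
      simp [List.getD_eq_getElem?_getD, List.getElem?_eq_getElem han]
    have hcast : ((a : Nat) : Int) + w = (((a + w' : Nat)) : Int) := by push_cast; omega
    have hget2 : PySem.List.pyGetD q (((a : Nat) : Int) + w) 0 = q[a + w']'hawn := by
      rw [hcast, PySem.List.pyGetD_natCast]
      simp [List.getD_eq_getElem?_getD, List.getElem?_eq_getElem hawn]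
    have ht : pvWsum q a w' - PySem.List.pyGetD q ((a : Nat) : Int) 0
        + PySem.List.pyGetD q (((a : Nat) : Int) + w) 0 = pvWsum q (a + 1) w' := by
      rw [hget1, hget2, pvWindowStep q a w' (by omega) hawn]
    -- B's window value
    have hpre1 : PySem.List.pyGetD (pvPrefix 0 q) (((a : Nat) : Int) + 1 + w) 0
        = (q.take (a + 1 + w')).sum := by
      have : ((a : Nat) : Int) + 1 + w = (((a + 1 + w' : Nat)) : Int) := by push_cast; omega
      rw [this]
      simp only [PySem.List.pyGetD_natCast]
      rw [pvPrefix_getD q (a + 1 + w') 0 (by omega)]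
      ring
    have hpre2 : PySem.List.pyGetD (pvPrefix 0 q) (((a : Nat) : Int) + 1) 0
        = (q.take (a + 1)).sum := by
      have : ((a : Nat) : Int) + 1 = (((a + 1 : Nat)) : Int) := by push_cast; omega
      rw [this]
      simp only [PySem.List.pyGetD_natCast]
      rw [pvPrefix_getD q (a + 1) 0 (by omega)]
      ring
    have hcond : PySem.List.pyGetD (pvPrefix 0 q) (((a : Nat) : Int) + 1 + w) 0
        - PySem.List.pyGetD (pvPrefix 0 q) (((a : Nat) : Int) + 1) 0 = pvWsum q (a + 1) w' := by
      rw [hpre1, hpre2]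
      have : a + 1 + w' = (a + 1) + w' := by omega
      rw [this, pvTakeDiff]
    rw [ht, hcond]
    by_cases hlt : pvWsum q (a + 1) w' < req
    · rw [if_pos hlt, if_pos hlt]
      simp only [Option.getD_some]
      ring
    · rw [if_neg hlt, if_neg hlt]
      have hcast2 : ((a : Nat) : Int) + 1 = (((a + 1 : Nat)) : Int) := by push_cast; ring
      rw [hcast2]
      exact ih (a + 1) (by omega)

-- the while-walk = first-match over the descending range
lemma pvWalkEq (q : List Int) (rq : Int) :
    ∀ (k : Nat) (i : Int), i.toNat ≤ k → 1 ≤ i →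
    pvAWalk q rq i = (pvFindCut q rq (PySem.List.pyRange i 0 (-1))).getD 1 := by
  intro k
  induction k with
  | zero => intro i hk hi; omega
  | succ k ih =>
    intro i hk hi
    rw [pvAWalk]
    rw [PySem.List.pyRange_neg_one_cons (by omega : (0 : Int) < i)]
    simp only [pvFindCut]
    by_cases hcond : PySem.List.pyGetD q (i - 1) 0 < rq ∧ 1 < i
    · rw [dif_pos hcond, if_neg (by omega), ih (i - 1) (by omega) (by omega)]
    · rw [dif_neg hcond]
      by_cases hge : rq ≤ PySem.List.pyGetD q (i - 1) 0
      · rw [if_pos hge]; rfl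
      · rw [if_neg hge]
        have hi1 : i = 1 := by omega
        subst hi1
        norm_num [PySem.List.pyRange_neg_one_eq_nil (le_refl (0 : Int)), pvFindCut]

lemma pvWalk_ge_one (q : List Int) (rq : Int) :
    ∀ (k : Nat) (i : Int), i.toNat ≤ k → 1 ≤ i → 1 ≤ pvAWalk q rq i := by
  intro k
  induction k with
  | zero => intro i hk hi; omega
  | succ k ih =>
    intro i hk hi
    rw [pvAWalk]
    by_cases hcond : PySem.List.pyGetD q (i - 1) 0 < rq ∧ 1 < i
    · rw [dif_pos hcond]; exact ih (i - 1) (by omega) (by omega)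
    · rw [dif_neg hcond]; exact hi

lemma pvFindKeep_some (pre : List Int) (w need : Int) :
    ∀ (l : List Int) (r : Int), pvFindKeep pre w need l = some r → ∃ j ∈ l, r = j - 1 + w := by
  intro l
  induction l with
  | nil => intro r h; simp [pvFindKeep] at h
  | cons j rest ih =>
    intro r h
    simp only [pvFindKeep] at h
    split_ifs at h with hc
    · exact ⟨j, by simp, by injection h with h'; omega⟩
    · obtain ⟨j', hj', hr⟩ := ih r h
      exact ⟨j', by simp [hj'], hr⟩

-- ===== VERDICT (by name: the statement is the Claim_ definition above) =====
theorem sliding_window_trim_spec : Claim_equal_sliding_window_trim := by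
  intro seq qual w rq _ hpre
  have hhw : (1 : Int) ≤ w := hpre
  unfold Spec_sliding_window_trim
  have hnmin : min (PySem.Str.len seq) (PySem.Str.len qual)
      = ((min seq.toList.length qual.toList.length : Nat) : Int) := by
    rw [PySem.Str.len_eq, PySem.Str.len_eq]
    push_cast
    ring
  simp only [sliding_window_trim, sliding_window_trim_alt]
  rw [hnmin, pvQuals_eq seq.toList qual.toList]
  set q := pvQuals seq.toList qual.toList with hqdef
  rw [show ((min seq.toList.length qual.toList.length : Nat) : Int) = ((q.length : Nat) : Int) by
    rw [pvQuals_length]]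
  by_cases h1 : ((q.length : Nat) : Int) < w
  · rw [if_pos h1, if_pos h1]
  · rw [if_neg h1, if_neg h1]
    have hwn : w.toNat ≤ q.length := by omega
    have hsum : (PySem.List.slice q none (some w)).sum = pvWsum q 0 w.toNat := by
      rw [PySem.List.slice_to q (by omega : (0 : Int) ≤ w)]
      unfold pvWsum
      simp
    have hpreW : PySem.List.pyGetD (pvPrefix 0 q) w 0 = pvWsum q 0 w.toNat := by
      rw [show (w : Int) = ((w.toNat : Nat) : Int) by omega, PySem.List.pyGetD_natCast,
        pvPrefix_getD q w.toNat 0 hwn]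
      unfold pvWsum
      simp only [List.drop_zero, zero_add]
      congr 2
    rw [hsum, hpreW]
    by_cases h2 : pvWsum q 0 w.toNat < rq * w
    · rw [if_pos h2, if_pos h2]
    · rw [if_neg h2, if_neg h2]
      have hkeep := pvLoopEq q w (rq * w) hhw (q.length - w.toNat) 0 (by omega)
      simp only [Nat.cast_zero, zero_add] at hkeep
      rw [hkeep]
      set keep := (pvFindKeep (pvPrefix 0 q) w (rq * w)
        (PySem.List.pyRange 1 ((q.length : Int) - w + 1) 1)).getD ((q.length : Int)) with hkdef
      have hk1 : (1 : Int) ≤ keep := by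
        rw [hkdef]
        cases hfk : pvFindKeep (pvPrefix 0 q) w (rq * w)
            (PySem.List.pyRange 1 ((q.length : Int) - w + 1) 1) with
        | none => simp; omega
        | some r =>
          obtain ⟨j, hj, hr⟩ := pvFindKeep_some _ _ _ _ _ hfk
          rw [PySem.List.mem_pyRange_one] at hj
          simp
          omega
      rw [pvWalkEq q rq keep.toNat keep le_rfl hk1]
      have hge1 := pvWalk_ge_one q rq keep.toNat keep le_rfl hk1
      rw [pvWalkEq q rq keep.toNat keep le_rfl hk1] at hge1
      rw [if_neg (by omega : ¬ (pvFindCut q rq (PySem.List.pyRange keep 0 (-1))).getD 1 < 1)]
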